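-- pv_equiv track=rewrite | github.com/DavidYan2001/PVChat | consisid/batch_all_generation_detail.py | split_workload
-- ===== SOURCE A (Python) =====
-- def split_workload(total_items, num_gpus):
--     """
--     Split workload according to available GPU count
--     Return processing range list for each GPU [(start1, end1), (start2, end2), ...]
--     """
--     base_size = total_items // num_gpus
--     remainder = total_items % num_gpus
--
--     ranges = []
--     start = 0
--     for i in range(num_gpus):
--         # If there's a remainder, front GPUs process one more
--         size = base_size + (1 if i < remainder else 0)
--         end = start + size
--         ranges.append((start, end))
--         start = end
--
--     return ranges
-- ===== SOURCE B (Python) =====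
-- def split_workload(total_items, num_gpus):
--     """
--     Split workload according to available GPU count
--     Return processing range list for each GPU [(start1, end1), (start2, end2), ...]
--     """
--     base_size = total_items // num_gpus
--     remainder = total_items % num_gpus
--     return [(i * base_size + min(i, remainder),
--              (i + 1) * base_size + min(i + 1, remainder))
--             for i in range(num_gpus)]
-- ===== Notes on version B (the rewrite author's own statement) =====
-- stated objective: alternative
-- what changed: Replaced the sequential loop carrying a running 'start' accumulator by a stateless comprehension that computes each GPU's (start, end) in closed form from its index i via i*base_size + min(i, remainder).
-- outside the precondition, e.g. on split_workload(10, 0): A raises ZeroDivisionError, B raises ZeroDivisionError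
import Mathlib
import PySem

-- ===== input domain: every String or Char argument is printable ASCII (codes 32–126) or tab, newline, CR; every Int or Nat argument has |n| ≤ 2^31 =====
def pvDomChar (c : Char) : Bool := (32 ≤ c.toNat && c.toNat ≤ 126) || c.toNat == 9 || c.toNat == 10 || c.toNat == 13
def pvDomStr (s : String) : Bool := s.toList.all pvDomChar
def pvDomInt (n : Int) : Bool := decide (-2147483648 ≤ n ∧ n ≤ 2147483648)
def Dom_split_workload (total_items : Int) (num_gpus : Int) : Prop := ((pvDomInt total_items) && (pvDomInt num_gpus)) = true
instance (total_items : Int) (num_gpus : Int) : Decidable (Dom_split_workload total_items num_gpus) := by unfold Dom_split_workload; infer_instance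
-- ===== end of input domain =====

-- B replaces A's loop carrying a running 'start' accumulator by a stateless
-- comprehension computing each GPU's range in closed form from its index (objective: alternative).

-- ===== PORT A =====
def split_workload (total_items : Int) (num_gpus : Int) : List (Int × Int) :=
  let base_size := PySem.Int.floordiv total_items num_gpus
  let remainder := PySem.Int.mod total_items num_gpus
  let r := (PySem.List.pyRange 0 num_gpus 1).foldl
    (fun (st : List (Int × Int) × Int) i =>
      let size := base_size + (if i < remainder then 1 else 0)
      let e := st.2 + size
      (st.1 ++ [(st.2, e)], e)) ([], 0)
  r.1

-- ===== PORT B =====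
def split_workload_alt (total_items : Int) (num_gpus : Int) : List (Int × Int) :=
  let base_size := PySem.Int.floordiv total_items num_gpus
  let remainder := PySem.Int.mod total_items num_gpus
  (PySem.List.pyRange 0 num_gpus 1).map
    (fun i => (i * base_size + min i remainder,
               (i + 1) * base_size + min (i + 1) remainder))

-- ===== PRECONDITION & SPEC =====
-- Pre_ excludes exactly num_gpus = 0, where Python A raises ZeroDivisionError.
def Pre_split_workload (total_items : Int) (num_gpus : Int) : Prop := num_gpus ≠ 0
instance (total_items : Int) (num_gpus : Int) : Decidable (Pre_split_workload total_items num_gpus) := by unfold Pre_split_workload; infer_instance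
def pvWitness_split_workload : Int × Int := (10, 3)

def Spec_split_workload (total_items : Int) (num_gpus : Int) (out : List (Int × Int)) : Prop := out = split_workload_alt total_items num_gpus
instance (total_items : Int) (num_gpus : Int) (out : List (Int × Int)) : Decidable (Spec_split_workload total_items num_gpus out) := by unfold Spec_split_workload; infer_instance

-- ===== CLAIM (what is proved, stated in full; the proofs are below) =====
def Claim_equal_split_workload : Prop := ∀ (total_items : Int) (num_gpus : Int), Dom_split_workload total_items num_gpus → Pre_split_workload total_items num_gpus → Spec_split_workload total_items num_gpus (split_workload total_items num_gpus)

-- ===== LEMMAS AND PROOFS =====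

-- The loop invariant: after folding over range(0, n), the carried start equals
-- n*base + min n rem, and the accumulated list is the closed-form map.
theorem split_workload_fold_closed (base rem : Int) (hrem : 0 ≤ rem) (m : Nat) :
    ((List.range m).map (fun k : Nat => ((0:Int) + (k:Int)))).foldl
      (fun (st : List (Int × Int) × Int) i =>
        (st.1 ++ [(st.2, st.2 + (base + if i < rem then 1 else 0))],
         st.2 + (base + if i < rem then 1 else 0))) ([], 0)
    = (((List.range m).map (fun k : Nat => ((0:Int) + (k:Int)))).map
        (fun i => (i * base + min i rem, (i + 1) * base + min (i + 1) rem)),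
       (m : Int) * base + min (m : Int) rem) := by
  induction m with
  | zero => simp [min_eq_left hrem]
  | succ n ih =>
      rw [List.range_succ]
      simp only [List.map_append, List.foldl_append, List.map_cons, List.map_nil,
        List.foldl_cons, List.foldl_nil, ih, Prod.mk.injEq]
      have hz : (0:Int) + (n:Int) = (n:Int) := by ring
      have hb : ((n:Int) + 1) * base = (n:Int) * base + base := by ring
      constructor
      · rw [List.append_cancel_left_eq, hz]
        simp only [List.cons.injEq, and_true, Prod.mk.injEq]
        simp only [true_and]
        split_ifs <;> omega
      · rw [hz]; push_cast; split_ifs <;> omega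

-- ===== VERDICT (by name: the statement is the Claim_ definition above) =====
theorem split_workload_spec : Claim_equal_split_workload := by
  intro total_items num_gpus _ hpre
  unfold Spec_split_workload split_workload split_workload_alt
  rw [PySem.List.pyRange_one]
  simp only [sub_zero]
  rcases lt_or_gt_of_ne hpre with hneg | hpos
  · have : num_gpus.toNat = 0 := by omega
    simp [this]
  · have hrem : 0 ≤ PySem.Int.mod total_items num_gpus := by
      rw [PySem.Int.mod_eq_emod_of_pos (b := num_gpus)]
      · exact Int.emod_nonneg _ (by omega)
      · exact hpos
    rw [split_workload_fold_closed _ _ hrem]
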